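-- pv_equiv track=rewrite | github.com/AhanR/compiler-back-end | compilerPhases/icg.py | mostImportantOperation
-- ===== SOURCE A (Python) =====
-- def mostImportantOperation(exp):
--     precedence = {
--         "/" : 2,
--         "*" : 2,
--         "+" : 1,
--         "-" : 1,
--         "" : 0
--     }
--     last = {
--         "op" : "",
--         "i" : -1
--     }
--     for ci,c in enumerate(exp):
--         if c in precedence and precedence[c] > precedence[last["op"]]:
--             last["op"] = c
--             last["i"] = ci
--     return last["i"]
-- ===== SOURCE B (Python) =====
-- def mostImportantOperation(exp):
--     for i, c in enumerate(exp):
--         if c == '*' or c == '/':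
--             return i
--     for i, c in enumerate(exp):
--         if c == '+' or c == '-':
--             return i
--     return -1
-- ===== Notes on version B (the rewrite author's own statement) =====
-- stated objective: simpler
-- what changed: Replaced the single max-tracking scan with a running best (op, index) state by two precedence-tiered scans with early return: first the leftmost '*' or '/', else the leftmost '+' or '-', else -1.
import Mathlib
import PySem

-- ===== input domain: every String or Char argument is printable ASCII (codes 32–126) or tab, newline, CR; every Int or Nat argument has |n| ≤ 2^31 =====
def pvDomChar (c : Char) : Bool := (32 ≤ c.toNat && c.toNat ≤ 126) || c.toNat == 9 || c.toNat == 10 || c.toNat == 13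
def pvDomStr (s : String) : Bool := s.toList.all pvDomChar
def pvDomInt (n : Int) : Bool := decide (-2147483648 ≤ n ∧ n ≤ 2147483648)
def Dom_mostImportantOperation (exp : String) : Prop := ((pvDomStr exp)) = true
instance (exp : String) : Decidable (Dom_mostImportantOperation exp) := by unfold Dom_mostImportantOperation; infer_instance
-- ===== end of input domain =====

-- B replaces A's single max-tracking scan by two precedence-tiered first-match scans (simpler decomposition, same O(n)).


-- ===== PORT A =====
-- precedence[·] for a one-character key (the characters of exp); keys are "/" "*" "+" "-" ""
def pvPrecC (c : Char) : Int :=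
  if c = '/' then 2 else if c = '*' then 2 else if c = '+' then 1 else if c = '-' then 1 else 0

-- precedence[last["op"]] : last["op"] is a string ("" initially, later a one-char string)
def pvPrecS (s : String) : Int :=
  if s = "/" then 2 else if s = "*" then 2 else if s = "+" then 1 else if s = "-" then 1 else 0

-- one iteration of A's loop body; state = (last["op"], last["i"])
def pvStepA (last : String × Int) (p : Int × Char) : String × Int :=
  if (p.2 = '/' ∨ p.2 = '*' ∨ p.2 = '+' ∨ p.2 = '-') ∧ pvPrecS last.1 < pvPrecC p.2
  then (String.ofList [p.2], p.1) else last

def mostImportantOperation (exp : String) : Int :=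
  ((PySem.List.enumerate exp.toList).foldl pvStepA ("", -1)).2

-- ===== PORT B =====
def pvIsHigh (p : Int × Char) : Bool := p.2 == '*' || p.2 == '/'
def pvIsLow (p : Int × Char) : Bool := p.2 == '+' || p.2 == '-'

def mostImportantOperation_alt (exp : String) : Int :=
  match (PySem.List.enumerate exp.toList).find? pvIsHigh with
  | some p => p.1
  | none =>
    match (PySem.List.enumerate exp.toList).find? pvIsLow with
    | some p => p.1
    | none => -1

-- ===== PRECONDITION & SPEC =====
def Spec_mostImportantOperation (exp : String) (out : Int) : Prop := out = mostImportantOperation_alt exp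
instance (exp : String) (out : Int) : Decidable (Spec_mostImportantOperation exp out) := by unfold Spec_mostImportantOperation; infer_instance

-- ===== CLAIM (what is proved, stated in full; the proofs are below) =====
def Claim_equal_mostImportantOperation : Prop := ∀ (exp : String), Dom_mostImportantOperation exp → Spec_mostImportantOperation exp (mostImportantOperation exp)

-- ===== LEMMAS AND PROOFS =====

theorem pvPrecC_le_two (c : Char) : pvPrecC c ≤ 2 := by
  unfold pvPrecC; split_ifs <;> omega

theorem pvPrecC_le_one_of_not_high (p : Int × Char) (h : ¬ pvIsHigh p = true) :
    pvPrecC p.2 ≤ 1 := by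
  unfold pvIsHigh at h
  unfold pvPrecC
  split_ifs with h1 h2 <;> simp_all

theorem pvHigh_cases (p : Int × Char) (h : pvIsHigh p = true) : p.2 = '*' ∨ p.2 = '/' := by
  unfold pvIsHigh at h
  rcases Bool.or_eq_true_iff.mp h with h | h
  · exact Or.inl (beq_iff_eq.mp h)
  · exact Or.inr (beq_iff_eq.mp h)

theorem pvLow_cases (p : Int × Char) (h : pvIsLow p = true) : p.2 = '+' ∨ p.2 = '-' := by
  unfold pvIsLow at h
  rcases Bool.or_eq_true_iff.mp h with h | h
  · exact Or.inl (beq_iff_eq.mp h)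
  · exact Or.inr (beq_iff_eq.mp h)

theorem pvFold_high (l : List (Int × Char)) (s : String × Int) (hs : pvPrecS s.1 = 2) :
    l.foldl pvStepA s = s := by
  induction l with
  | nil => rfl
  | cons p t ih =>
      have hstep : pvStepA s p = s := by
        unfold pvStepA
        rw [if_neg]
        rintro ⟨-, hlt⟩
        have := pvPrecC_le_two p.2
        omega
      rw [List.foldl_cons, hstep, ih]

theorem pvHighState (p : Int × Char) (h : pvIsHigh p = true) :
    pvPrecS (String.ofList [p.2]) = 2 := by
  rcases pvHigh_cases p h with h | h <;> rw [h] <;> decide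

theorem pvLowState (p : Int × Char) (h : pvIsLow p = true) :
    pvPrecS (String.ofList [p.2]) = 1 := by
  rcases pvLow_cases p h with h | h <;> rw [h] <;> decide

theorem pvHighPrecC (p : Int × Char) (h : pvIsHigh p = true) : pvPrecC p.2 = 2 := by
  rcases pvHigh_cases p h with h | h <;> rw [h] <;> decide

theorem pvLowPrecC (p : Int × Char) (h : pvIsLow p = true) : pvPrecC p.2 = 1 := by
  rcases pvLow_cases p h with h | h <;> rw [h] <;> decide

theorem pvStep_high (s : String × Int) (p : Int × Char) (h : pvIsHigh p = true)
    (hs : pvPrecS s.1 ≤ 1) : pvStepA s p = (String.ofList [p.2], p.1) := by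
  unfold pvStepA
  rw [if_pos]
  refine ⟨?_, by rw [pvHighPrecC p h]; omega⟩
  rcases pvHigh_cases p h with h | h
  · exact Or.inr (Or.inl h)
  · exact Or.inl h

theorem pvFold_low (l : List (Int × Char)) (s : String × Int) (hs : pvPrecS s.1 = 1) :
    l.foldl pvStepA s =
      (match l.find? pvIsHigh with
       | some p => (String.ofList [p.2], p.1)
       | none => s) := by
  induction l generalizing s with
  | nil => rfl
  | cons p t ih =>
      by_cases hp : pvIsHigh p = true
      · rw [List.foldl_cons, pvStep_high s p hp (by omega),
            pvFold_high t _ (pvHighState p hp), List.find?_cons_of_pos hp]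
      · have hstep : pvStepA s p = s := by
          unfold pvStepA
          rw [if_neg]
          rintro ⟨-, hlt⟩
          have := pvPrecC_le_one_of_not_high p hp
          omega
        rw [List.foldl_cons, hstep, ih s hs,
            List.find?_cons_of_neg (by simpa using hp)]

theorem pvFold_empty (l : List (Int × Char)) (i : Int) :
    l.foldl pvStepA ("", i) =
      (match l.find? pvIsHigh with
       | some p => (String.ofList [p.2], p.1)
       | none =>
         match l.find? pvIsLow with
         | some p => (String.ofList [p.2], p.1)
         | none => ("", i)) := by
  induction l generalizing i with
  | nil => rfl
  | cons p t ih =>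
      by_cases hp : pvIsHigh p = true
      · rw [List.foldl_cons, pvStep_high ("", i) p hp (by simp [pvPrecS]),
            pvFold_high t _ (pvHighState p hp), List.find?_cons_of_pos hp]
      · by_cases hq : pvIsLow p = true
        · have hstep : pvStepA ("", i) p = (String.ofList [p.2], p.1) := by
            unfold pvStepA
            rw [if_pos]
            refine ⟨?_, by rw [pvLowPrecC p hq]; simp [pvPrecS]⟩
            rcases pvLow_cases p hq with h | h
            · exact Or.inr (Or.inr (Or.inl h))
            · exact Or.inr (Or.inr (Or.inr h))
          rw [List.foldl_cons, hstep, pvFold_low t _ (pvLowState p hq),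
              List.find?_cons_of_neg (by simpa using hp), List.find?_cons_of_pos hq]
        · have hstep : pvStepA ("", i) p = ("", i) := by
            unfold pvStepA
            rw [if_neg]
            rintro ⟨hop, -⟩
            rcases hop with h | h | h | h <;> simp_all [pvIsHigh, pvIsLow]
          rw [List.foldl_cons, hstep, ih i,
              List.find?_cons_of_neg (by simpa using hp),
              List.find?_cons_of_neg (by simpa using hq)]

-- ===== VERDICT (by name: the statement is the Claim_ definition above) =====
theorem mostImportantOperation_spec : Claim_equal_mostImportantOperation := by
  intro exp _
  unfold Spec_mostImportantOperation mostImportantOperation mostImportantOperation_alt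
  rw [pvFold_empty]
  cases (PySem.List.enumerate exp.toList).find? pvIsHigh with
  | some p => rfl
  | none =>
      cases (PySem.List.enumerate exp.toList).find? pvIsLow with
      | some p => rfl
      | none => rfl
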